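-- pv_equiv track=rewrite | github.com/FISAAI03/FISAAI_CODING_TEST | Python/PGS/LEVEL1/택배 상자 꺼내기/조진원.py | solution
-- ===== SOURCE A (Python) =====
-- def solution(n, w, num):
--     answer = 0 # num을 찾기 위해 꺼내는 원소의 총 개수
--
--     boxes = [[] for _ in range(w)] # w개의 빈 상자 생성
--
--     idx = 0 # 현재 원소를 넣을 상자 인덱스
--     i = True # True: 인덱스 증가 방향, False: 인덱스 감소 방향
--     for ns in range(1,n+1) : # 1부터 n까지의 숫자를 각 상자에 지그재그로 분배
--         boxes[idx].append(ns) # 현재 상자에 숫자 추가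
--         if i : # 인덱스 증가 방향
--             idx += 1 # 다음 상자로 이동
--             if idx == w : # 마지막 상자를 넘어가면
--                 idx -= 1 # 마지막 상자로 되돌리고
--                 i = False # 방향을 감소로 변경
--         else : # 인덱스 감소 방향
--             idx -= 1 # 이전 상자로 이동
--             if idx < 0 : # 첫 번째 상자보다 작아지면
--                 idx += 1 # 첫 번째 상자로 되돌리고
--                 i = True # 방향을 증가로 변경
--
--     for box in boxes : # 각 상자를 순회
--         if num in box : # 현재 상자에 num이 있다면
--             p = 0 # 꺼낸 원소를 저장할 변수
--             while p != num : # num을 찾을 때까지 반복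
--                 p = box.pop() # 상자에서 마지막 원소를 꺼냄
--                 answer += 1 # 꺼낸 원소 개수 증가
--         else : # num이 없으면
--             pass # 다음 상자로 넘어감
--     return answer
-- ===== SOURCE B (Python) =====
-- def solution(n, w, num):
--     # O(1): num's column via the snake period 2w, then count numbers in [num, n]
--     # falling in that column with two floor-division interval counts.
--     if num < 1 or num > n:
--         return 0
--     T = 2 * w
--     r = (num - 1) % T
--     col = r if r < w else T - 1 - r
--     total = 0
--     for res in (col, T - 1 - col):  # the two residues mod T that land in this column
--         total += (n - 1 - res) // T - (num - 2 - res) // T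
--     return total
-- ===== Notes on version B (the rewrite author's own statement) =====
-- stated objective: faster
-- what changed: B replaces A's O(n) simulation (filling w box lists one number at a time, then popping) with O(1) arithmetic: num's column follows from the snake period 2w, and the boxes popped are counted with two floor-division interval counts of numbers >= num in that column.
import Mathlib
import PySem

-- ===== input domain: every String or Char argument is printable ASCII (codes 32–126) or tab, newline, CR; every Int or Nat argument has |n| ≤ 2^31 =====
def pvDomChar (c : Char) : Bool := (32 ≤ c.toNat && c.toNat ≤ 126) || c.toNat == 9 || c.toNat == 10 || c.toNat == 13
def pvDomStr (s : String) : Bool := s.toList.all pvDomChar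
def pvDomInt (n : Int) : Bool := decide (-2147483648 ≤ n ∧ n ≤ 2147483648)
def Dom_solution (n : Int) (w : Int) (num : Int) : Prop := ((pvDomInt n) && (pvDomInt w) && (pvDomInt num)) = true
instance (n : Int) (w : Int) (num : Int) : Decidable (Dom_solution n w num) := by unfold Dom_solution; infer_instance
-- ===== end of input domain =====

-- B replaces A's O(n) box simulation by O(1) arithmetic: num's column via the snake
-- period 2w and two floor-division interval counts of the numbers ≥ num in that column.

-- ===== PORT A =====
-- one iteration of A's first for-loop: append ns to boxes[idx], then move idx zigzag.
-- boxes[idx] is accessed via idx.toNat: under Pre_solution idx stays in [0, w)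
-- (Python raises IndexError before any negative/out-of-range idx can arise here).
def fillStepA (w : Int) (st : List (List Int) × Int × Bool) (ns : Int) :
    List (List Int) × Int × Bool :=
  let boxes := st.1.modify st.2.1.toNat (fun b => b ++ [ns])
  if st.2.2 then
    let idx := st.2.1 + 1
    if idx = w then (boxes, idx - 1, false) else (boxes, idx, true)
  else
    let idx := st.2.1 - 1
    if idx < 0 then (boxes, idx + 1, true) else (boxes, idx, false)

-- A's while-loop: pop from the end, counting, until num is popped.
-- Python raises IndexError on pop from an empty box; that branch (returning acc)
-- is unreachable because the loop only runs when num ∈ box.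
def whilePopA (box : List Int) (p : Int) (num : Int) (acc : Int) : Int :=
  if p = num then acc
  else
    match h : PySem.List.pop? box with
    | none => acc
    | some (x, box') =>
        have : box'.length < box.length := by
          have h2 := PySem.List.length_of_pop?_eq_some box h; simp at h2; omega
        whilePopA box' x num (acc + 1)
termination_by box.length

def solution (n : Int) (w : Int) (num : Int) : Int :=
  (((PySem.List.pyRange 1 (n + 1)).foldl (fillStepA w)
      ((PySem.List.pyRange 0 w).map (fun _ => ([] : List Int)), 0, true)).1).foldl
    (fun answer box => if num ∈ box then whilePopA box 0 num answer else answer) 0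

-- ===== PORT B =====
def solution_alt (n : Int) (w : Int) (num : Int) : Int :=
  if num < 1 ∨ n < num then 0
  else
    let T := 2 * w
    let r := PySem.Int.mod (num - 1) T
    let col := if r < w then r else T - 1 - r
    [col, T - 1 - col].foldl
      (fun total res =>
        total + (PySem.Int.floordiv (n - 1 - res) T - PySem.Int.floordiv (num - 2 - res) T)) 0

-- ===== PRECONDITION & SPEC =====
-- Python A raises IndexError (boxes[0] on an empty boxes list) when w ≤ 0 and the
-- fill loop runs, i.e. n ≥ 1; everything else (any num, n ≤ 0, w ≥ 1) is admitted.
def Pre_solution (n : Int) (w : Int) (num : Int) : Prop := 1 ≤ w ∨ n ≤ 0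
instance (n : Int) (w : Int) (num : Int) : Decidable (Pre_solution n w num) := by
  unfold Pre_solution; infer_instance
def pvWitness_solution : Int × Int × Int := (7, 3, 5)

def Spec_solution (n : Int) (w : Int) (num : Int) (out : Int) : Prop := out = solution_alt n w num
instance (n : Int) (w : Int) (num : Int) (out : Int) : Decidable (Spec_solution n w num out) := by
  unfold Spec_solution; infer_instance

-- ===== CLAIM (what is proved, stated in full; the proofs are below) =====
def Claim_equal_solution : Prop := ∀ (n : Int) (w : Int) (num : Int), Dom_solution n w num → Pre_solution n w num → Spec_solution n w num (solution n w num)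

-- ===== LEMMAS AND PROOFS =====

-- column of the k-th number (k ≥ 1) in the snake filling with w columns
def colF (w k : Int) : Int :=
  if (k - 1) % (2 * w) < w then (k - 1) % (2 * w) else 2 * w - 1 - (k - 1) % (2 * w)

-- closed form of the state of A's fill loop after m numbers have been placed
def boxesAt (w : Int) (m : Nat) : List (List Int) :=
  (PySem.List.pyRange 0 w).map
    (fun j => (PySem.List.pyRange 1 ((m : Int) + 1)).filter (fun ns => colF w ns == j))

def idxAt (w : Int) (m : Nat) : Int :=
  if (m : Int) % (2 * w) < w then (m : Int) % (2 * w) else 2 * w - 1 - (m : Int) % (2 * w)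

def dirAt (w : Int) (m : Nat) : Bool := decide ((m : Int) % (2 * w) < w)

lemma emod_succ (m T : Int) (hT : 0 < T) :
    (m + 1) % T = if m % T = T - 1 then 0 else m % T + 1 := by
  have h1 : 0 ≤ m % T ∧ m % T < T := ⟨Int.emod_nonneg m (by omega), Int.emod_lt_of_pos m hT⟩
  have h2 : T * (m / T) + m % T = m := Int.ediv_add_emod m T
  have h3 : (m + 1) % T = (m % T + 1) % T := by
    conv_lhs => rw [show m + 1 = (m % T + 1) + T * (m / T) by omega]
    rw [Int.add_mul_emod_self_left]
  rw [h3]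
  split
  · next h => rw [h]; simp
  · next h => exact Int.emod_eq_of_lt (by omega) (by omega)

lemma idxAt_eq_colF (w : Int) (m : Nat) : idxAt w m = colF w ((m : Int) + 1) := by
  simp [idxAt, colF]

lemma idxAt_bounds (w : Int) (hw : 1 ≤ w) (m : Nat) : 0 ≤ idxAt w m ∧ idxAt w m < w := by
  have h := And.intro (Int.emod_nonneg (m : Int) (show 2 * w ≠ 0 by omega))
    (Int.emod_lt_of_pos (m : Int) (show (0:Int) < 2 * w by omega))
  unfold idxAt; split <;> omega

-- modifying the idxAt-th box appends the next number to exactly its column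
lemma boxes_step (w : Int) (hw : 1 ≤ w) (m : Nat) :
    (boxesAt w m).modify (idxAt w m).toNat (fun b => b ++ [(m : Int) + 1]) = boxesAt w (m + 1) := by
  have hb := idxAt_bounds w hw m
  have hcol := idxAt_eq_colF w m
  apply List.ext_getElem
  · simp [boxesAt, List.length_modify]
  · intro i h1 h2
    have hlen : (PySem.List.pyRange 0 w).length = w.toNat := by
      simpa using PySem.List.length_pyRange_one 0 w
    have hi : i < w.toNat := by
      simpa [boxesAt, List.length_modify, hlen] using h1
    rw [List.getElem_modify]
    have hget : ∀ (mm : Nat) (h : i < (boxesAt w mm).length), (boxesAt w mm)[i]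
        = (PySem.List.pyRange 1 ((mm : Int) + 1)).filter (fun ns => colF w ns == (i : Int)) := by
      intro mm h
      simp only [boxesAt, List.getElem_map]
      congr 1
      simpa using PySem.List.getElem_pyRange_one 0 w i (by simpa [hlen] using hi)
    rw [hget m (by simpa [boxesAt, List.length_modify] using h1), hget (m + 1) h2]
    have hsplit : PySem.List.pyRange 1 (((m : Nat) + 1 : Nat) + 1)
        = PySem.List.pyRange 1 ((m : Int) + 1) ++ [(m : Int) + 1] := by
      push_cast
      exact PySem.List.pyRange_one_succ_right (by omega)
    rw [hsplit, List.filter_append]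
    by_cases hc : (idxAt w m).toNat = i
    · have : colF w ((m : Int) + 1) = (i : Int) := by omega
      simp [this, hc]
    · have : ¬ (colF w ((m : Int) + 1) = (i : Int)) := by omega
      simp [this, hc]

-- the idx/direction zigzag transition matches the closed form
lemma idx_dir_step (w : Int) (hw : 1 ≤ w) (m : Nat) :
    (if dirAt w m then
      let idx := idxAt w m + 1
      if idx = w then (idx - 1, false) else (idx, true)
     else
      let idx := idxAt w m - 1
      if idx < 0 then (idx + 1, true) else (idx, false)) = ((idxAt w (m + 1) : Int), dirAt w (m + 1)) := by
  have hT : (0:Int) < 2 * w := by omega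
  have h1 : 0 ≤ (m : Int) % (2 * w) ∧ (m : Int) % (2 * w) < 2 * w :=
    ⟨Int.emod_nonneg _ (by omega), Int.emod_lt_of_pos _ hT⟩
  have hs : ((m : Int) + 1) % (2 * w) = if (m : Int) % (2 * w) = 2 * w - 1 then 0 else (m : Int) % (2 * w) + 1 :=
    emod_succ (m : Int) (2 * w) hT
  have hcast : ((m + 1 : Nat) : Int) = (m : Int) + 1 := by push_cast; ring
  simp only [idxAt, dirAt, hcast, hs]
  by_cases he : (m : Int) % (2 * w) = 2 * w - 1
  · simp [he, show ¬(2 * w - 1 < w) by omega, show (0 : Int) < w by omega]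
  · split <;> split <;> simp_all <;> split <;> split <;> simp_all <;> omega

lemma fillStepA_eq (w : Int) (st : List (List Int) × Int × Bool) (ns : Int) :
    fillStepA w st ns = (st.1.modify st.2.1.toNat (fun b => b ++ [ns]),
      if st.2.2 then
        let idx := st.2.1 + 1
        if idx = w then (idx - 1, false) else (idx, true)
      else
        let idx := st.2.1 - 1
        if idx < 0 then (idx + 1, true) else (idx, false)) := by
  unfold fillStepA
  dsimp only
  split <;> split <;> rfl

lemma fill_loop_eq (w : Int) (hw : 1 ≤ w) (m : Nat) :
    (PySem.List.pyRange 1 ((m : Int) + 1)).foldl (fillStepA w)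
      ((PySem.List.pyRange 0 w).map (fun _ => ([] : List Int)), 0, true)
    = (boxesAt w m, idxAt w m, dirAt w m) := by
  induction m with
  | zero =>
      simp [PySem.List.pyRange_one_eq_nil (le_refl 1), boxesAt, idxAt, dirAt,
            show (0:Int) < w by omega]
  | succ m ih =>
      rw [show (((m + 1 : Nat)) : Int) + 1 = ((m : Int) + 1) + 1 by push_cast; ring,
          PySem.List.pyRange_one_succ_right (by omega), List.foldl_append, ih]
      simp only [List.foldl_cons, List.foldl_nil]
      rw [fillStepA_eq]
      dsimp only
      rw [boxes_step w hw m, idx_dir_step w hw m]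

-- fold over boxes with no occurrence of num does nothing
lemma foldl_no_mem (num : Int) (l : List (List Int)) (a : Int)
    (h : ∀ box ∈ l, num ∉ box) :
    l.foldl (fun answer box => if num ∈ box then whilePopA box 0 num answer else answer) a = a := by
  induction l generalizing a with
  | nil => rfl
  | cons b bs ih =>
      have hb : num ∉ b := h b (by simp)
      simp [hb]
      exact ih a (fun box hm => h box (by simp [hm]))

-- A's pop-counting loop on a box shaped L1 ++ num :: L2 with num ∉ L2
lemma whilePopA_split (num : Int) (L1 : List Int) :
    ∀ (L2 : List Int), num ∉ L2 →
    ∀ (p acc : Int), p ≠ num →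
      whilePopA (L1 ++ num :: L2) p num acc = acc + (L2.length : Int) + 1 := by
  intro L2
  induction L2 using List.reverseRecOn with
  | nil =>
      intro _ p acc hp
      rw [whilePopA]
      simp only [if_neg hp]
      rw [PySem.List.pop?_last L1 num]
      dsimp only
      rw [whilePopA]
      simp
  | append_singleton L2 x ih =>
      intro hmem p acc hp
      have hx : x ≠ num := by simp at hmem; tauto
      have hm2 : num ∉ L2 := by simp at hmem; tauto
      rw [whilePopA]
      simp only [if_neg hp]
      rw [show L1 ++ num :: (L2 ++ [x]) = (L1 ++ num :: L2) ++ [x] by simp,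
          PySem.List.pop?_last]
      dsimp only
      rw [ih hm2 x (acc + 1) hx]
      simp; ring

lemma ediv_succ_sub (T x : Int) (hT : 0 < T) :
    (x + 1) / T - x / T = if (x + 1) % T = 0 then 1 else 0 := by
  have h1 : 0 ≤ x % T ∧ x % T < T := ⟨Int.emod_nonneg x (by omega), Int.emod_lt_of_pos x hT⟩
  have h2 : T * (x / T) + x % T = x := Int.ediv_add_emod x T
  have hs := emod_succ x T hT
  by_cases h : x % T = T - 1
  · have hx1 : x + 1 = T * (x / T + 1) := by
      have : T * (x / T + 1) = T * (x / T) + T := by ring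
      omega
    have : (x + 1) / T = x / T + 1 := by
      rw [hx1, Int.mul_ediv_cancel_left _ (show T ≠ 0 by omega)]
    simp [this, hs, h]
  · have hx1 : (x + 1) / T = x / T := by
      rw [show x + 1 = (x % T + 1) + T * (x / T) by omega,
          Int.add_mul_ediv_left _ _ (show T ≠ 0 by omega),
          Int.ediv_eq_zero_of_lt (by omega) (by omega)]
      ring
    simp [hx1, hs, h]
    omega

lemma mod_shift (T res y : Int) (hT : 0 < T) (h0 : 0 ≤ res) (hres : res < T) :
    ((y - res) % T = 0) ↔ y % T = res := by
  have h1 : 0 ≤ y % T ∧ y % T < T := ⟨Int.emod_nonneg y (by omega), Int.emod_lt_of_pos y hT⟩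
  rw [Int.sub_emod, Int.emod_eq_of_lt h0 hres]
  set d := y % T - res with hd
  by_cases hdn : 0 ≤ d
  · rw [Int.emod_eq_of_lt hdn (by omega)]; omega
  · have : d % T = (d + T * 1) % T := (Int.add_mul_emod_self_left d T 1).symm
    rw [this, Int.emod_eq_of_lt (by omega) (by omega)]
    omega

-- counting k ∈ [A, A + k) with (k-1) % T = res, as a difference of floor quotients
lemma count_mod_interval (T res : Int) (hT : 0 < T) (h0 : 0 ≤ res) (hres : res < T)
    (A : Int) : ∀ (k : Nat),
    (((PySem.List.pyRange A (A + (k : Int))).countP (fun x => (x - 1) % T == res) : Int))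
      = (A + (k : Int) - 2 - res) / T - (A - 2 - res) / T := by
  intro k
  induction k with
  | zero => simp [PySem.List.pyRange_one_eq_nil (le_refl A)]
  | succ k ih =>
      have hsplit : PySem.List.pyRange A (A + ((k : Int) + 1))
          = PySem.List.pyRange A (A + (k : Int)) ++ [A + (k : Int)] := by
        rw [show A + ((k : Int) + 1) = (A + (k : Int)) + 1 by ring]
        exact PySem.List.pyRange_one_succ_right (by omega)
      push_cast
      rw [hsplit, List.countP_append]
      have hdiff := ediv_succ_sub T (A + (k : Int) - 2 - res) hT
      have hiff := mod_shift T res (A + (k : Int) - 1) hT h0 hres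
      push_cast
      rw [ih]
      simp only [List.countP_cons, List.countP_nil]
      by_cases hc : (A + (k : Int) - 1) % T = res
      · have : (A + (k : Int) - 2 - res + 1) % T = 0 := by
          rw [show A + (k : Int) - 2 - res + 1 = (A + (k : Int) - 1) - res by ring]
          exact hiff.mpr hc
        rw [show A + ((k : Int) + 1) - 2 - res = (A + (k : Int) - 2 - res) + 1 by ring]
        simp [show ((A + (k : Int) - 1) % T == res) = true from beq_iff_eq.mpr hc]
        omega
      · have : ¬ (A + (k : Int) - 2 - res + 1) % T = 0 := by
          rw [show A + (k : Int) - 2 - res + 1 = (A + (k : Int) - 1) - res by ring]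
          exact fun hx => hc (hiff.mp hx)
        rw [show A + ((k : Int) + 1) - 2 - res = (A + (k : Int) - 2 - res) + 1 by ring]
        simp [hc]
        omega

-- splitting a count over a disjunction of disjoint predicates
lemma countP_or_disjoint (l : List Int) (p q : Int → Bool)
    (h : ∀ x ∈ l, ¬(p x = true ∧ q x = true)) :
    l.countP (fun x => p x || q x) = l.countP p + l.countP q := by
  induction l with
  | nil => rfl
  | cons b bs ih =>
      have hb := h b (by simp)
      have := ih (fun x hx => h x (by simp [hx]))
      simp only [List.countP_cons, this]
      cases hp : p b <;> cases hq : q b <;> simp_all <;> omega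

-- colF hits c exactly on the two residues c and 2w-1-c
lemma colF_eq_iff (w c k : Int) (hw : 1 ≤ w) (hc0 : 0 ≤ c) (hcw : c < w) :
    (colF w k = c) ↔ ((k - 1) % (2 * w) = c ∨ (k - 1) % (2 * w) = 2 * w - 1 - c) := by
  have h := And.intro (Int.emod_nonneg (k - 1) (show 2 * w ≠ 0 by omega))
    (Int.emod_lt_of_pos (k - 1) (show (0:Int) < 2 * w by omega))
  unfold colF; split <;> constructor <;> intro hx <;> omega

lemma colF_bounds (w k : Int) (hw : 1 ≤ w) : 0 ≤ colF w k ∧ colF w k < w := by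
  have h := And.intro (Int.emod_nonneg (k - 1) (show 2 * w ≠ 0 by omega))
    (Int.emod_lt_of_pos (k - 1) (show (0:Int) < 2 * w by omega))
  unfold colF; split <;> omega

-- the B-side closed form counts exactly the numbers ≥ num in num's column
lemma key_count (w n num : Int) (hw : 1 ≤ w) (h1 : 1 ≤ num) (h2 : num ≤ n) :
    ((PySem.List.pyRange num (n + 1)).countP (fun x => colF w x == colF w num) : Int)
      = ((n - 1 - colF w num) / (2 * w) - (num - 2 - colF w num) / (2 * w))
        + ((n - 1 - (2 * w - 1 - colF w num)) / (2 * w) - (num - 2 - (2 * w - 1 - colF w num)) / (2 * w)) := by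
  have hT : (0:Int) < 2 * w := by omega
  have hcB := colF_bounds w num hw
  set c := colF w num with hc
  have hcongr : (PySem.List.pyRange num (n + 1)).countP (fun x => colF w x == c)
      = (PySem.List.pyRange num (n + 1)).countP
          (fun x => ((x - 1) % (2 * w) == c) || ((x - 1) % (2 * w) == 2 * w - 1 - c)) := by
    apply List.countP_congr
    intro x _
    have := colF_eq_iff w c x hw hcB.1 hcB.2
    simp only [beq_iff_eq, Bool.or_eq_true, decide_eq_true_eq]
    simp [this]
  have hdisj := countP_or_disjoint (PySem.List.pyRange num (n + 1))
      (fun x => (x - 1) % (2 * w) == c) (fun x => (x - 1) % (2 * w) == 2 * w - 1 - c)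
      (by intro x _ hx
          simp only [beq_iff_eq] at hx
          omega)
  have hk : n + 1 = num + ((n + 1 - num).toNat : Int) := by omega
  have hc1 := count_mod_interval (2 * w) c hT hcB.1 (by omega) num (n + 1 - num).toNat
  have hc2 := count_mod_interval (2 * w) (2 * w - 1 - c) hT (by omega) (by omega) num (n + 1 - num).toNat
  rw [hcongr, hdisj]
  push_cast
  rw [show PySem.List.pyRange num (n + 1) = PySem.List.pyRange num (num + ((n + 1 - num).toNat : Int)) by rw [← hk]]
  rw [hc1, hc2]
  have he : num + ((n + 1 - num).toNat : Int) = n + 1 := by omega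
  rw [he]
  ring

-- A's second loop on the closed-form boxes returns the count of k ∈ [num, n] in num's column
lemma a_fold_eq (w n num : Int) (hw : 1 ≤ w) (h1 : 1 ≤ num) (h2 : num ≤ n) :
    (boxesAt w n.toNat).foldl
        (fun answer box => if num ∈ box then whilePopA box 0 num answer else answer) 0
      = ((PySem.List.pyRange num (n + 1)).countP (fun x => colF w x == colF w num) : Int) := by
  have hmn : (n.toNat : Int) = n := Int.toNat_of_nonneg (by omega)
  have hcB := colF_bounds w num hw
  set c := colF w num with hc
  set f : Int → List Int :=
    fun j => (PySem.List.pyRange 1 ((n.toNat : Int) + 1)).filter (fun ns => colF w ns == j) with hf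
  have hboxes : boxesAt w n.toNat
      = (PySem.List.pyRange 0 c).map f ++ f c :: (PySem.List.pyRange (c + 1) w).map f := by
    unfold boxesAt
    rw [PySem.List.pyRange_one_append 0 c w hcB.1 (by omega),
        PySem.List.pyRange_one_cons (show c < w from hcB.2)]
    simp [hf]
  -- split f c around num
  have hsplitf : f c = ((PySem.List.pyRange 1 num).filter (fun ns => colF w ns == c))
      ++ num :: ((PySem.List.pyRange (num + 1) ((n.toNat : Int) + 1)).filter (fun ns => colF w ns == c)) := by
    have t1 : PySem.List.pyRange num ((n.toNat : Int) + 1)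
        = num :: PySem.List.pyRange (num + 1) ((n.toNat : Int) + 1) :=
      PySem.List.pyRange_one_cons (by omega)
    have t2 : PySem.List.pyRange 1 ((n.toNat : Int) + 1)
        = PySem.List.pyRange 1 num ++ PySem.List.pyRange num ((n.toNat : Int) + 1) :=
      PySem.List.pyRange_one_append 1 num ((n.toNat : Int) + 1) h1 (by omega)
    simp only [hf]
    rw [t2, t1, List.filter_append, List.filter_cons]
    simp [hc]
  have hmemfc : num ∈ f c := by
    rw [hsplitf]; simp
  have hnotmem : ∀ j : Int, j ≠ c → num ∉ f j := by
    intro j hj hmem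
    simp only [hf, List.mem_filter] at hmem
    have h3 : colF w num = j := by simpa using hmem.2
    exact hj (by rw [hc, h3])
  rw [hboxes, List.foldl_append]
  rw [foldl_no_mem num _ 0 (by
    intro box hbox
    simp only [List.mem_map] at hbox
    obtain ⟨j, hj, rfl⟩ := hbox
    have := (PySem.List.mem_pyRange_one.mp hj).2
    exact hnotmem j (by omega))]
  simp only [List.foldl_cons, if_pos hmemfc]
  rw [hsplitf, whilePopA_split num _ _ (by
      intro hmem
      rw [List.mem_filter] at hmem
      have := (PySem.List.mem_pyRange_one.mp hmem.1).1
      omega) 0 0 (by omega)]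
  rw [foldl_no_mem num _ _ (by
    intro box hbox
    simp only [List.mem_map] at hbox
    obtain ⟨j, hj, rfl⟩ := hbox
    have := (PySem.List.mem_pyRange_one.mp hj).1
    exact hnotmem j (by omega))]
  have hcount : (PySem.List.pyRange num (n + 1)).countP (fun x => colF w x == c)
      = ((PySem.List.pyRange (num + 1) ((n.toNat : Int) + 1)).filter (fun ns => colF w ns == c)).length + 1 := by
    rw [PySem.List.pyRange_one_cons (by omega), List.countP_cons]
    rw [List.countP_eq_length_filter]
    simp [hc, hmn]
  rw [hcount]
  push_cast
  ring

-- ===== VERDICT (by name: the statement is the Claim_ definition above) =====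
theorem solution_spec : Claim_equal_solution := by
  intro n w num _ hPre
  unfold Spec_solution
  by_cases hw : 1 ≤ w
  case neg =>
    have hn : n ≤ 0 := by cases hPre with | inl h => omega | inr h => exact h
    have hB : solution_alt n w num = 0 := by
      unfold solution_alt
      rw [if_pos (by omega)]
    rw [hB]
    unfold solution
    rw [PySem.List.pyRange_one_eq_nil (a := 1) (b := n + 1) (by omega),
        PySem.List.pyRange_one_eq_nil (a := 0) (b := w) (by omega)]
    simp
  case pos =>
    have hrange : PySem.List.pyRange 1 (n + 1) = PySem.List.pyRange 1 ((n.toNat : Int) + 1) := by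
      by_cases hn : 0 ≤ n
      · rw [Int.toNat_of_nonneg hn]
      · rw [PySem.List.pyRange_one_eq_nil (by omega), PySem.List.pyRange_one_eq_nil (by omega)]
    have hA1 : solution n w num = (boxesAt w n.toNat).foldl
        (fun answer box => if num ∈ box then whilePopA box 0 num answer else answer) 0 := by
      unfold solution
      rw [hrange, fill_loop_eq w hw n.toNat]
    by_cases hnum : num < 1 ∨ n < num
    · have hB : solution_alt n w num = 0 := by
        unfold solution_alt
        rw [if_pos hnum]
      rw [hB, hA1, foldl_no_mem]
      intro box hbox hmem
      simp only [boxesAt, List.mem_map] at hbox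
      obtain ⟨j, hj, rfl⟩ := hbox
      rw [List.mem_filter] at hmem
      have := PySem.List.mem_pyRange_one.mp hmem.1
      omega
    · push_neg at hnum
      obtain ⟨h1num, h2num⟩ := hnum
      have hT : (0:Int) < 2 * w := by omega
      have hcB := colF_bounds w num hw
      rw [hA1, a_fold_eq w n num hw h1num h2num, key_count w n num hw h1num h2num]
      unfold solution_alt
      rw [if_neg (by omega)]
      dsimp only
      rw [PySem.Int.mod_eq_emod_of_pos hT]
      rw [show (if (num - 1) % (2 * w) < w then (num - 1) % (2 * w) else 2 * w - 1 - (num - 1) % (2 * w)) = colF w num from rfl]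
      simp only [List.foldl_cons, List.foldl_nil, PySem.Int.floordiv_eq_ediv_of_pos hT]
      ring
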